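-- pv_equiv track=rewrite | github.com/HershyOrg/hershy | backtest/src/plot_orderbook_gap.py | _select_hour
-- ===== SOURCE A (Python) =====
-- from typing import Optional
--
-- def _select_hour(rows: list[dict], hour_open_ms: Optional[int]) -> tuple[int, list[dict]]:
--     if not rows:
--         raise RuntimeError("no rows with orderbook data found")
--     if hour_open_ms is None:
--         hour_open_ms = max(r["hour_open_ms"] for r in rows)
--     filtered = [r for r in rows if r["hour_open_ms"] == hour_open_ms]
--     if not filtered:
--         raise RuntimeError(f"no rows for hour_open_ms={hour_open_ms}")
--     filtered.sort(key=lambda r: r.get("t_ms", 0))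
--     return hour_open_ms, filtered
-- ===== SOURCE B (Python) =====
-- from typing import Optional
--
--
-- def _insort(r: dict, bucket: list[dict]) -> list[dict]:
--     # insert r before the first row with a strictly larger t_ms key (keeps ties stable)
--     if not bucket:
--         return [r]
--     if r.get("t_ms", 0) < bucket[0].get("t_ms", 0):
--         return [r] + bucket
--     return [bucket[0]] + _insort(r, bucket[1:])
--
--
-- def _select_hour(rows: list[dict], hour_open_ms: Optional[int]) -> tuple[int, list[dict]]:
--     if not rows:
--         raise RuntimeError("no rows with orderbook data found")
--     if hour_open_ms is None:
--         hour_open_ms = rows[0]["hour_open_ms"]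
--         for r in rows[1:]:
--             if hour_open_ms < r["hour_open_ms"]:
--                 hour_open_ms = r["hour_open_ms"]
--     bucket: list[dict] = []
--     for r in rows:
--         if r["hour_open_ms"] == hour_open_ms:
--             bucket = _insort(r, bucket)
--     if not bucket:
--         raise RuntimeError(f"no rows for hour_open_ms={hour_open_ms}")
--     return hour_open_ms, bucket
-- ===== Notes on version B (the rewrite author's own statement) =====
-- stated objective: alternative
-- what changed: B replaces A's filter-then-library-sort with a manual running-maximum loop for the default hour and a single pass over rows that keeps the matching bucket ordered by stable insertion (_insort) as it goes, so no separate filter pass or sort call remains.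
import Mathlib
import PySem

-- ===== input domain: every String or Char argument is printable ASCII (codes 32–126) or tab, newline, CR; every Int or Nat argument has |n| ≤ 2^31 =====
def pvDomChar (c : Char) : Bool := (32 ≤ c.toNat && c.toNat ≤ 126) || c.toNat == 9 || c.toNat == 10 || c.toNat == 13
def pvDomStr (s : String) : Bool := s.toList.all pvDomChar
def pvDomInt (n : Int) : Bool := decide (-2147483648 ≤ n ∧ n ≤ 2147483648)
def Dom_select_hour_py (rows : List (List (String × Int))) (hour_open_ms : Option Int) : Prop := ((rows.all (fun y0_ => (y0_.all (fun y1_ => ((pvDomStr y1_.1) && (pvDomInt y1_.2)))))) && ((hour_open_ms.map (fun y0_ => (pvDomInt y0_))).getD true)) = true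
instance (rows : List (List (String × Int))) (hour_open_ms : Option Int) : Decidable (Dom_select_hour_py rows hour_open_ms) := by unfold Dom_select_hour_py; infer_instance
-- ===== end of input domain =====

-- B keeps the matching bucket ordered by stable insertion in one pass and finds the default hour
-- with a hand-rolled running maximum, instead of A's filter pass followed by a library sort;
-- alternative decomposition, same observable result.
-- A sorts the freshly built `filtered` list in place; callers cannot observe that mutation.

-- shared row-lookup helpers (Python r[k] / r.get(k, 0) on a dict, first-match association-list convention)
def pvRowKey (r : List (String × Int)) : Int :=
  (((r.find? (fun p => p.1 == "hour_open_ms")).map (fun p => p.2)).getD 0)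
def pvRowT (r : List (String × Int)) : Int :=
  (((r.find? (fun p => p.1 == "t_ms")).map (fun p => p.2)).getD 0)

-- ===== PORT A =====
-- `r["hour_open_ms"]` raises KeyError when missing; Pre_ excludes such rows, the total stand-in `.getD 0` is never relevant there.
def select_hour_py (rows : List (List (String × Int))) (hour_open_ms : Option Int) : Int × (List (List (String × Int))) :=
  let h : Int := match hour_open_ms with
    | some h => h
    | none => (PySem.List.max? (rows.map pvRowKey) (fun x => x)).getD 0
  let filtered := rows.filter (fun r => pvRowKey r == h)
  (h, PySem.List.sorted filtered pvRowT)

-- ===== PORT B =====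
-- Source B's _insort: insert r before the first row with a strictly larger t_ms key
def pvInsort (r : List (String × Int)) : List (List (String × Int)) → List (List (String × Int))
  | [] => [r]
  | q :: qs => if pvRowT r < pvRowT q then r :: q :: qs else q :: pvInsort r qs

def select_hour_py_alt (rows : List (List (String × Int))) (hour_open_ms : Option Int) : Int × (List (List (String × Int))) :=
  let h : Int := match hour_open_ms with
    | some h => h
    | none =>
      match rows with
      | [] => 0   -- unreachable: the Python raises on empty rows (outside Pre_)
      | r0 :: rest => rest.foldl (fun m r => if m < pvRowKey r then pvRowKey r else m) (pvRowKey r0)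
  let bucket := rows.foldl (fun acc r => if pvRowKey r == h then pvInsort r acc else acc) []
  (h, bucket)

-- ===== PRECONDITION & SPEC =====
-- Pre_: exactly where the Python A returns: rows nonempty, every row has key "hour_open_ms"
-- (else KeyError), and when an hour is given some row carries it (else RuntimeError).
def Pre_select_hour_py (rows : List (List (String × Int))) (hour_open_ms : Option Int) : Prop :=
  rows ≠ [] ∧ (∀ r ∈ rows, (r.find? (fun p => p.1 == "hour_open_ms")).isSome = true) ∧
  (∀ h, hour_open_ms = some h → ∃ r ∈ rows, pvRowKey r = h)
instance (rows : List (List (String × Int))) (hour_open_ms : Option Int) : Decidable (Pre_select_hour_py rows hour_open_ms) := by unfold Pre_select_hour_py; infer_instance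
def pvWitness_select_hour_py : (List (List (String × Int))) × Option Int :=
  ([[("hour_open_ms", 1), ("t_ms", 5)], [("hour_open_ms", 2)], [("hour_open_ms", 1), ("t_ms", 3)]], some 1)

def Spec_select_hour_py (rows : List (List (String × Int))) (hour_open_ms : Option Int) (out : Int × (List (List (String × Int)))) : Prop := out = select_hour_py_alt rows hour_open_ms
instance (rows : List (List (String × Int))) (hour_open_ms : Option Int) (out : Int × (List (List (String × Int)))) : Decidable (Spec_select_hour_py rows hour_open_ms out) := by unfold Spec_select_hour_py; infer_instance

-- ===== CLAIM (what is proved, stated in full; the proofs are below) =====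
def Claim_equal_select_hour_py : Prop := ∀ (rows : List (List (String × Int))) (hour_open_ms : Option Int), Dom_select_hour_py rows hour_open_ms → Pre_select_hour_py rows hour_open_ms → Spec_select_hour_py rows hour_open_ms (select_hour_py rows hour_open_ms)

-- ===== LEMMAS AND PROOFS =====

-- Source B's recursive insertion is PySem's insertBy on the t_ms key
theorem pvInsort_eq (r : List (String × Int)) (l : List (List (String × Int))) :
    pvInsort r l = PySem.List.insertBy (fun a b => decide (pvRowT a < pvRowT b)) r l := by
  induction l with
  | nil => rfl
  | cons q qs ih => simp [pvInsort, PySem.List.insertBy, ih]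

-- the running-maximum fold is a member of the scanned values
theorem pv_fold_mem (x : Int) (l : List Int) :
    l.foldl (fun m k => if m < k then k else m) x ∈ x :: l := by
  induction l generalizing x with
  | nil => simp
  | cons k t ih =>
    simp only [List.foldl_cons]
    rcases List.mem_cons.mp (ih (if x < k then k else x)) with h | h
    · rw [h]; split <;> simp
    · simp [h]

-- the running-maximum fold dominates the scanned values
theorem pv_fold_ge (x : Int) (l : List Int) :
    ∀ a ∈ x :: l, a ≤ l.foldl (fun m k => if m < k then k else m) x := by
  induction l generalizing x with
  | nil => simp
  | cons k t ih =>
    intro a ha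
    simp only [List.foldl_cons]
    rcases List.mem_cons.mp ha with rfl | ha
    · refine le_trans ?_ (ih _ _ (List.mem_cons_self ..))
      split <;> omega
    · rcases List.mem_cons.mp ha with rfl | ha
      · refine le_trans ?_ (ih _ _ (List.mem_cons_self ..))
        split <;> omega
      · exact ih _ _ (List.mem_cons.mpr (Or.inr ha))

-- Python max(...) of a nonempty list equals the running-maximum fold
theorem pv_max_eq_fold (x : Int) (l : List Int) :
    (PySem.List.max? (x :: l) (fun y => y)).getD 0 =
      l.foldl (fun m k => if m < k then k else m) x := by
  cases hm : PySem.List.max? (x :: l) (fun y => y) with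
  | none => exact absurd ((PySem.List.max?_eq_none_iff _ _).mp hm) (by simp)
  | some m =>
    have hmem : m ∈ x :: l := PySem.List.max?_mem hm
    have h1 : m ≤ l.foldl (fun m k => if m < k then k else m) x := pv_fold_ge x l m hmem
    have h2 : l.foldl (fun m k => if m < k then k else m) x ≤ m :=
      PySem.List.max?_isMax hm _ (pv_fold_mem x l)
    simp [le_antisymm h1 h2]

-- ===== VERDICT (by name: the statement is the Claim_ definition above) =====
theorem select_hour_py_spec : Claim_equal_select_hour_py := by
  intro rows hour_open_ms _ hpre
  show _ = _
  unfold select_hour_py select_hour_py_alt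
  have hbucket : ∀ h : Int,
      PySem.List.sorted (rows.filter (fun r => pvRowKey r == h)) pvRowT =
        rows.foldl (fun acc r => if pvRowKey r == h then pvInsort r acc else acc) [] := by
    intro h
    rw [PySem.List.sorted_eq_foldl_insertBy, List.foldl_filter]
    simp only [pvInsort_eq]
  cases hour_open_ms with
  | some h => simpa using hbucket h
  | none =>
    obtain ⟨hne, -, -⟩ := hpre
    cases rows with
    | nil => exact absurd rfl hne
    | cons r0 rest =>
      simp only [List.map_cons]
      rw [pv_max_eq_fold (pvRowKey r0) (rest.map pvRowKey), List.foldl_map]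
      simpa using hbucket _
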